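-- pv_equiv track=rewrite | github.com/principalraulcorreos-spec/mi-bot-telegram | bot.py | mostrar_registros
-- ===== SOURCE A (Python) =====
-- def escape_md(text):
--     chars = r'_*[]()~`>#+-=|{}.!'
--     for c in chars:
--         text = str(text).replace(c, f'\\{c}')
--     return text
--
-- def mostrar_registros(registros, titulo):
--     if not registros:
--         return f"📚 *{escape_md(titulo)}*\n\n_Sin registros aún\\._"
--     texto = f"📚 *{escape_md(titulo)}*\n\n"
--     for r in reversed(registros[-5:]):
--         fecha = escape_md(r['fecha'])
--         resp  = escape_md(r['respuesta'][:300])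
--         texto += f"📅 _{fecha}_\n{resp}\n\n"
--     return texto
-- ===== SOURCE B (Python) =====
-- def mostrar_registros(registros, titulo):
--     esc = frozenset('_*[]()~`>#+-=|{}.!')
--     out = []
--
--     def put(s):
--         # emit s character by character, escaping inline (no escape char is a backslash)
--         for ch in str(s):
--             if ch in esc:
--                 out.append('\\')
--             out.append(ch)
--
--     out.append('📚 *'); put(titulo); out.append('*\n\n')
--     n = len(registros)
--     if n == 0:
--         out.append('_Sin registros aún\\._')
--         return ''.join(out)
--     for i in range(n - 1, max(n - 6, -1), -1):
--         r = registros[i]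
--         out.append('📅 _'); put(r['fecha']); out.append('_\n')
--         put(r['respuesta'][:300]); out.append('\n\n')
--     return ''.join(out)
-- ===== Notes on version B (the rewrite author's own statement) =====
-- stated objective: alternative
-- what changed: B is a single-pass character emitter: instead of escape_md's 18 sequential full-string replace passes and string concatenation over a reversed slice, B walks the last records by a descending index loop and emits every output character (with its backslash decided per character) into one accumulator list joined once at the end.
-- outside the precondition, e.g. on mostrar_registros([{'fecha': 'x'}], 't'): A raises KeyError, B raises KeyError
import Mathlib
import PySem

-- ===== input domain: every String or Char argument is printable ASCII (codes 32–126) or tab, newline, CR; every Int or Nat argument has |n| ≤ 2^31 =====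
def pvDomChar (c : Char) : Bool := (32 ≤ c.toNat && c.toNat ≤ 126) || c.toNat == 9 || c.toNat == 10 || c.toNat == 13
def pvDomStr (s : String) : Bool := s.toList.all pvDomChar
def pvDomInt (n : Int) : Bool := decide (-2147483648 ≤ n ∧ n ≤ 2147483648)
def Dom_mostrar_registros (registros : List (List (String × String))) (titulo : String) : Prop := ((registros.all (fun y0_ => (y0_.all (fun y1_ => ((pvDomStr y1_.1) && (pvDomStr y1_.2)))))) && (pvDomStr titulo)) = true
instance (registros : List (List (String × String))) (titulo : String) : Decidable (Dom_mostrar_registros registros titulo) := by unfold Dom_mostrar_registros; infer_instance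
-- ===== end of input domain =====

-- B replaces A's escape_md (18 sequential full-string .replace passes) and string
-- accumulation over reversed(registros[-5:]) by a single-pass character emitter: a
-- descending index loop over the last records appends every output character (deciding
-- each backslash per character) into one accumulator list joined once at the end
-- (objective: alternative; same return value).

-- ===== PORT A =====
-- the escape character set r'_*[]()~`>#+-=|{}.!'
def pvChars : List Char := "_*[]()~`>#+-=|{}.!".toList

-- escape_md: for c in chars: text = str(text).replace(c, '\\'+c)   (text is already str here)
def escape_md (text : String) : String :=
  pvChars.foldl (fun t c => PySem.Str.replace t (String.ofList [c]) (String.ofList ['\\', c])) text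

-- r['fecha'] etc. (used by both ports): first-match association-list lookup;
-- Pre_ guarantees the key is present
def pvGet (r : List (String × String)) (k : String) : String :=
  (PySem.Dict.mk r).getD k ""

def mostrar_registros (registros : List (List (String × String))) (titulo : String) : String :=
  if registros.isEmpty then
    "📚 *" ++ escape_md titulo ++ "*\n\n_Sin registros aún\\._"
  else
    ((PySem.List.slice registros (some (-5)) none).reverse).foldl
      (fun texto r =>
        let fecha := escape_md (pvGet r "fecha")
        let resp := escape_md (PySem.Str.slice (pvGet r "respuesta") none (some 300))
        texto ++ "📅 _" ++ fecha ++ "_\n" ++ resp ++ "\n\n")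
      ("📚 *" ++ escape_md titulo ++ "*\n\n")

-- ===== PORT B =====
-- frozenset('_*[]()~`>#+-=|{}.!') — the distinct escape characters
def pvEsc : List Char := PySem.Set.ofList "_*[]()~`>#+-=|{}.!".toList

-- put(s): for ch in s: if ch in esc: out.append('\\'); out.append(ch)
def pvPut (out : List String) (s : String) : List String :=
  s.toList.foldl
    (fun o ch =>
      if ch ∈ pvEsc then (o ++ [String.ofList ['\\']]) ++ [String.ofList [ch]]
      else o ++ [String.ofList [ch]])
    out

def mostrar_registros_alt (registros : List (List (String × String))) (titulo : String) : String :=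
  let out0 := pvPut ["📚 *"] titulo ++ ["*\n\n"]
  let n : Int := registros.length
  if n = 0 then
    String.join (out0 ++ ["_Sin registros aún\\._"])
  else
    String.join
      ((PySem.List.pyRange (n - 1) (max (n - 6) (-1)) (-1)).foldl
        (fun out i =>
          -- registros[i]: i is always a valid index here, so the default is never used
          let r := PySem.List.pyGetD registros i []
          pvPut ((pvPut (out ++ ["📅 _"]) (pvGet r "fecha")) ++ [String.ofList ['_', '\n']])
              (PySem.Str.slice (pvGet r "respuesta") none (some 300))
            ++ [String.ofList ['\n', '\n']])
        out0)

-- ===== PRECONDITION & SPEC =====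
-- Pre_ excludes inputs where some of the (at most 5) displayed records lacks the key
-- 'fecha' or 'respuesta': there the Python A raises KeyError.
def Pre_mostrar_registros (registros : List (List (String × String))) (titulo : String) : Prop :=
  ∀ r ∈ PySem.List.slice registros (some (-5)) none,
    "fecha" ∈ r.map Prod.fst ∧ "respuesta" ∈ r.map Prod.fst

instance (registros : List (List (String × String))) (titulo : String) : Decidable (Pre_mostrar_registros registros titulo) := by unfold Pre_mostrar_registros; infer_instance

def pvWitness_mostrar_registros : (List (List (String × String))) × String :=
  ([[("fecha", "2024"), ("respuesta", "hola.")]], "Notas")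

def Spec_mostrar_registros (registros : List (List (String × String))) (titulo : String) (out : String) : Prop := out = mostrar_registros_alt registros titulo
instance (registros : List (List (String × String))) (titulo : String) (out : String) : Decidable (Spec_mostrar_registros registros titulo out) := by unfold Spec_mostrar_registros; infer_instance

-- ===== CLAIM (what is proved, stated in full; the proofs are below) =====
def Claim_equal_mostrar_registros : Prop := ∀ (registros : List (List (String × String))) (titulo : String), Dom_mostrar_registros registros titulo → Pre_mostrar_registros registros titulo → Spec_mostrar_registros registros titulo (mostrar_registros registros titulo)

-- ===== LEMMAS AND PROOFS =====

-- the single-pass escaping both proofs are reduced to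
def pvE (s : String) : String :=
  String.ofList (s.toList.flatMap (fun c => if c ∈ pvEsc then ['\\', c] else [c]))

-- Chars.replace with a single-character pattern substitutes character-wise
theorem pv_replace_go_single (c : Char) (nw : List Char) :
    ∀ (l : List Char) (fuel : Nat) (acc : List Char), l.length ≤ fuel →
      PySem.Chars.replace.go [c] nw fuel l acc
        = acc.reverse ++ l.flatMap (fun x => if x = c then nw else [x]) := by
  intro l
  induction l with
  | nil =>
    intro fuel acc _
    cases fuel <;> simp [PySem.Chars.replace.go]
  | cons x t ih =>
    intro fuel acc hf
    cases fuel with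
    | zero => simp at hf
    | succ f =>
      have ht : t.length ≤ f := by simpa using hf
      by_cases hx : x = c
      · subst hx
        simp [PySem.Chars.replace.go, List.isPrefixOf, ih f _ ht]
      · simp only [PySem.Chars.replace.go, List.isPrefixOf, Bool.and_true, beq_iff_eq]
        rw [if_neg (fun h => hx h.symm), ih f _ ht]
        simp [hx]

theorem pv_replace_single (l : List Char) (c : Char) (nw : List Char) :
    PySem.Chars.replace l [c] nw = l.flatMap (fun x => if x = c then nw else [x]) := by
  simpa using pv_replace_go_single c nw l l.length [] le_rfl

-- the chain of single-char replaces over a duplicate-free list of non-backslash chars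
-- is the single-pass translation
theorem pv_foldl_replace (cs : List Char) (h1 : cs.Nodup) (h2 : '\\' ∉ cs) :
    ∀ s : List Char,
      cs.foldl (fun t c => PySem.Chars.replace t [c] ['\\', c]) s
        = s.flatMap (fun x => if x ∈ cs then ['\\', x] else [x]) := by
  induction cs with
  | nil => intro s; simp
  | cons c cs' ih =>
    intro s
    have hnd : cs'.Nodup := h1.of_cons
    have hc : c ∉ cs' := by simp [List.nodup_cons] at h1; exact h1.1
    have hb : '\\' ∉ cs' := fun h => h2 (List.mem_cons_of_mem _ h)
    rw [List.foldl_cons, ih hnd hb, pv_replace_single, List.flatMap_assoc]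
    apply List.flatMap_congr
    intro x _
    by_cases hx : x = c
    · subst hx
      simp [hb, hc]
    · simp [hx]

-- A's escape_md is the single-pass pvE
theorem pv_escape_eq (s : String) : escape_md s = pvE s := by
  have key : ∀ (cs : List Char) (t : String),
      cs.foldl (fun t c => PySem.Str.replace t (String.ofList [c]) (String.ofList ['\\', c])) t
        = String.ofList (cs.foldl (fun l c => PySem.Chars.replace l [c] ['\\', c]) t.toList) := by
    intro cs
    induction cs with
    | nil => intro t; simp
    | cons c cs' ih =>
      intro t
      rw [List.foldl_cons, List.foldl_cons, ih]
      simp [PySem.Str.replace]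
  have hmem : ∀ x : Char, (x ∈ pvChars) = (x ∈ pvEsc) := by
    intro x
    have : pvEsc = pvChars := by decide
    rw [this]
  unfold escape_md pvE
  rw [key, pv_foldl_replace pvChars (by decide) (by decide)]
  simp only [hmem]

-- String.join distributes over ++
theorem pv_join_append (a b : List String) :
    String.join (a ++ b) = String.join a ++ String.join b := by
  have shift : ∀ (xs : List String) (acc : String),
      xs.foldl (· ++ ·) acc = acc ++ xs.foldl (· ++ ·) "" := by
    intro xs
    induction xs with
    | nil => intro acc; simp
    | cons y ys ihy =>
      intro acc
      rw [List.foldl_cons, List.foldl_cons, ihy (acc ++ y), ihy ("" ++ y)]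
      apply String.toList_injective
      simp
  show (a ++ b).foldl (· ++ ·) "" = String.join a ++ String.join b
  rw [List.foldl_append]
  exact shift b (String.join a)

-- joining what put() emitted = what was there before ++ the escaped string
theorem pv_join_put (out : List String) (s : String) :
    String.join (pvPut out s) = String.join out ++ pvE s := by
  unfold pvPut pvE
  have gen : ∀ (l : List Char) (out : List String),
      String.join (l.foldl
        (fun o ch =>
          if ch ∈ pvEsc then (o ++ [String.ofList ['\\']]) ++ [String.ofList [ch]]
          else o ++ [String.ofList [ch]]) out)
        = String.join out
          ++ String.ofList (l.flatMap (fun c => if c ∈ pvEsc then ['\\', c] else [c])) := by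
    intro l
    induction l with
    | nil => intro out; simp [String.join]
    | cons c t ih =>
      intro out
      rw [List.foldl_cons]
      by_cases hc : c ∈ pvEsc
      · rw [if_pos hc, ih, pv_join_append, pv_join_append]
        apply String.toList_injective
        simp [hc, String.join]
      · rw [if_neg hc, ih, pv_join_append]
        apply String.toList_injective
        simp [hc, String.join]
  exact gen s.toList out
-- the joined header accumulator
theorem pv_join_out0 (titulo : String) :
    String.join (pvPut ["📚 *"] titulo ++ ["*\n\n"])
      = "📚 *" ++ pvE titulo ++ "*\n\n" := by
  rw [pv_join_append, pv_join_put]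
  simp [String.join, String.append_assoc]

-- B's index countdown visits exactly reversed(registros[-5:])
theorem pv_range_records (registros : List (List (String × String))) :
    (PySem.List.pyRange ((registros.length : Int) - 1)
        (max ((registros.length : Int) - 6) (-1)) (-1)).map
      (fun i => PySem.List.pyGetD registros i [])
      = (PySem.List.slice registros (some (-5)) none).reverse := by
  rw [PySem.List.pyRange_neg_one_eq_reverse, List.map_reverse]
  have hb : max ((registros.length : Int) - 6) (-1) + 1 = max ((registros.length : Int) - 5) 0 := by
    omega
  have ha : (registros.length : Int) - 1 + 1 = (registros.length : Int) := by omega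
  rw [hb, ha]
  have hnn : (0 : Int) ≤ max ((registros.length : Int) - 5) 0 := le_max_right _ _
  rw [PySem.List.map_pyGetD_pyRange' registros [] hnn]
  congr 1
  rcases Nat.lt_or_ge registros.length 5 with h5 | h5
  · have ht : (max ((registros.length : Int) - 5) 0).toNat = 0 := by omega
    rw [ht]
    have : PySem.List.slice registros (some (-5)) none = registros := by
      rw [PySem.List.slice_from_neg_ofNat registros 5 (by omega)]
      simp [Nat.sub_eq_zero_of_le (le_of_lt h5)]
    simp [this]
  · have ht : (max ((registros.length : Int) - 5) 0).toNat = registros.length - 5 := by omega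
    rw [ht, PySem.List.slice_from_neg_ofNat registros 5 (by omega)]

-- joining one emitted record block = appending A's formatted block
theorem pv_step (out : List String) (r : List (String × String)) :
    String.join
        (pvPut ((pvPut (out ++ ["📅 _"]) (pvGet r "fecha")) ++ [String.ofList ['_', '\n']])
            (PySem.Str.slice (pvGet r "respuesta") none (some 300))
          ++ [String.ofList ['\n', '\n']])
      = String.join out ++ "📅 _" ++ escape_md (pvGet r "fecha") ++ "_\n"
          ++ escape_md (PySem.Str.slice (pvGet r "respuesta") none (some 300)) ++ "\n\n" := by
  rw [pv_join_append, pv_join_put, pv_join_append, pv_join_put, pv_join_append,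
    pv_escape_eq, pv_escape_eq]
  unfold pvGet pvE
  apply String.toList_injective
  simp [String.join]

-- joining B's loop accumulator = A's string accumulation, over any index list
theorem pv_fold_idx (registros : List (List (String × String))) :
    ∀ (idxs : List Int) (out : List String),
      String.join (idxs.foldl
        (fun out i =>
          pvPut ((pvPut (out ++ ["📅 _"]) (pvGet (PySem.List.pyGetD registros i []) "fecha"))
                ++ [String.ofList ['_', '\n']])
              (PySem.Str.slice (pvGet (PySem.List.pyGetD registros i []) "respuesta") none (some 300))
            ++ [String.ofList ['\n', '\n']]) out)
        = (idxs.map (fun i => PySem.List.pyGetD registros i [])).foldl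
            (fun texto r =>
              texto ++ "📅 _" ++ escape_md (pvGet r "fecha") ++ "_\n"
                ++ escape_md (PySem.Str.slice (pvGet r "respuesta") none (some 300)) ++ "\n\n")
            (String.join out) := by
  intro idxs
  induction idxs with
  | nil => intro out; rfl
  | cons i t ih =>
    intro out
    rw [List.foldl_cons, ih, List.map_cons, List.foldl_cons, pv_step]

-- ===== VERDICT (by name: the statement is the Claim_ definition above) =====
theorem mostrar_registros_spec : Claim_equal_mostrar_registros := by
  intro registros titulo _hdom _hpre
  show mostrar_registros registros titulo = mostrar_registros_alt registros titulo
  unfold mostrar_registros mostrar_registros_alt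
  by_cases h : registros.isEmpty
  · have hn : (registros.length : Int) = 0 := by
      simp [List.isEmpty_iff] at h; simp [h]
    simp only [h, if_pos, hn]
    rw [pv_join_append, pv_join_out0, pv_escape_eq]
    apply String.toList_injective
    simp [String.join]
  · have hne : registros ≠ [] := by simpa [List.isEmpty_iff] using h
    have hn : ¬ ((registros.length : Int) = 0) := by
      simp [List.length_eq_zero_iff]; exact hne
    simp only [h, Bool.false_eq_true, if_false, hn]
    rw [pv_fold_idx registros, pv_range_records registros, pv_join_out0,
      pv_escape_eq titulo]
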